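-- pv_equiv track=rewrite | github.com/yuqie6/MCP-Sheet-Parser-cot | src/parsers/xls_parser.py | _index_to_excel_cell
-- ===== SOURCE A (Python) =====
-- def _index_to_excel_cell(row: int, col: int) -> str:
--     """
--     将行列索引转换为Excel单元格引用格式。
--
--     Args:
--         row: 行索引（0开始）
--         col: 列索引（0开始）
--
--     Returns:
--         Excel单元格引用，如 "A1", "B2"
--     """
--     # 转换列索引为字母
--     col_str = ""
--     col += 1  # Excel列从1开始
--     while col > 0:
--         col -= 1
--         col_str = chr(65 + col % 26) + col_str
--         col //= 26
--
--     # 行号从1开始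
--     return f"{col_str}{row + 1}"
-- ===== SOURCE B (Python) =====
-- def _letters(n: int) -> str:
--     if n <= 0:
--         return ""
--     return _letters((n - 1) // 26) + chr(65 + (n - 1) % 26)
--
--
-- def _index_to_excel_cell(row: int, col: int) -> str:
--     return f"{_letters(col + 1)}{row + 1}"
-- ===== Notes on version B (the rewrite author's own statement) =====
-- stated objective: alternative
-- what changed: Replaces the in-place while-loop that prepends letters to an accumulator with a recursive helper over the same bijective base-26 recurrence that builds the letters most-significant-digit first.
import Mathlib
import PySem

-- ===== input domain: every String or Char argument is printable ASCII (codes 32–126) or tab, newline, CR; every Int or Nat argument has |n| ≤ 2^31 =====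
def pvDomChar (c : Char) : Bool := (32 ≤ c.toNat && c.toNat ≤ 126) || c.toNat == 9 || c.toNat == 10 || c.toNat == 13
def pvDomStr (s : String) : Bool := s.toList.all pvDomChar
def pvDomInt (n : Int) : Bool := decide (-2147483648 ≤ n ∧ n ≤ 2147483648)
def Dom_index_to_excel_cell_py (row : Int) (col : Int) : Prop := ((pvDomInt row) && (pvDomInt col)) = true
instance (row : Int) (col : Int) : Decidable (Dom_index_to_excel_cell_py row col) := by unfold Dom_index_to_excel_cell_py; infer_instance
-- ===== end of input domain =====

-- B replaces A's while-loop (which prepends letters to an accumulator) with a recursive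
-- helper over the same bijective base-26 recurrence, building the letters left-to-right.

-- termination measure fact shared by both ports' recursions
theorem pvStep_lt (col : Int) (h : 0 < col) :
    (PySem.Int.floordiv (col - 1) 26).toNat < col.toNat := by
  rw [PySem.Int.floordiv_eq_ediv_of_pos (by norm_num)]
  have h1 : (col - 1) / 26 ≤ col - 1 := Int.ediv_le_self _ (by omega)
  have h2 : 0 ≤ (col - 1) / 26 := Int.ediv_nonneg (by omega) (by norm_num)
  omega

-- ===== PORT A =====
-- the while loop of A, state = (col_str, col)
def pvLoopA (colStr : String) (col : Int) : String :=
  if h : 0 < col then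
    pvLoopA (String.ofList [Char.ofNat (65 + (PySem.Int.mod (col - 1) 26)).toNat] ++ colStr)
      (PySem.Int.floordiv (col - 1) 26)
  else colStr
termination_by col.toNat
decreasing_by exact pvStep_lt col h

def index_to_excel_cell_py (row : Int) (col : Int) : String :=
  pvLoopA "" (col + 1) ++ PySem.Int.toStr (row + 1)

-- ===== PORT B =====
-- recursive helper: letters(n) = "" if n <= 0 else letters((n-1)//26) + chr(65 + (n-1)%26)
def pvLetters (n : Int) : String :=
  if h : n ≤ 0 then ""
  else pvLetters (PySem.Int.floordiv (n - 1) 26)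
    ++ String.ofList [Char.ofNat (65 + (PySem.Int.mod (n - 1) 26)).toNat]
termination_by n.toNat
decreasing_by exact pvStep_lt n (by omega)

def index_to_excel_cell_py_alt (row : Int) (col : Int) : String :=
  pvLetters (col + 1) ++ PySem.Int.toStr (row + 1)

-- ===== PRECONDITION & SPEC =====
def Spec_index_to_excel_cell_py (row : Int) (col : Int) (out : String) : Prop := out = index_to_excel_cell_py_alt row col
instance (row : Int) (col : Int) (out : String) : Decidable (Spec_index_to_excel_cell_py row col out) := by unfold Spec_index_to_excel_cell_py; infer_instance

-- ===== CLAIM (what is proved, stated in full; the proofs are below) =====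
def Claim_equal_index_to_excel_cell_py : Prop := ∀ (row : Int) (col : Int), Dom_index_to_excel_cell_py row col → Spec_index_to_excel_cell_py row col (index_to_excel_cell_py row col)

-- ===== LEMMAS AND PROOFS =====
theorem pvLoopA_eq (acc : String) (col : Int) : pvLoopA acc col = pvLetters col ++ acc := by
  induction acc, col using pvLoopA.induct with
  | case1 acc col h ih =>
    rw [pvLoopA, pvLetters, dif_pos h, dif_neg (by omega), ih, String.append_assoc]
  | case2 acc col h =>
    rw [pvLoopA, pvLetters, dif_neg h, dif_pos (by omega)]
    simp

-- ===== VERDICT (by name: the statement is the Claim_ definition above) =====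
theorem index_to_excel_cell_py_spec : Claim_equal_index_to_excel_cell_py := by
  intro row col _
  unfold Spec_index_to_excel_cell_py index_to_excel_cell_py index_to_excel_cell_py_alt
  rw [pvLoopA_eq]
  simp
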